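-- pv_equiv track=rewrite | github.com/MLaaS-idfCts/Sefaria-Project | ML/scripts/get_section.py | get_section
-- ===== SOURCE A (Python) =====
-- def get_section(input_string):
--     """
--     Given a string, produce the substring that lies
--     after the last comma (if any) but
--     before the numbers at the end (if any).
--     """
--     result = input_string # init
--
--     # get rid of everything before last comma
--     last_comma = input_string.rfind(', ')
--     if last_comma != -1:
--         result = input_string[last_comma + 2:]
--
--     # keep only letters and spaces
--     result = ''.join(char for char in result if char.isalpha() or char == ' ')
--
--     # remove single chars
--     result = ' '.join( [w for w in result.split() if len(w)>1] )
--     return result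
-- ===== SOURCE B (Python) =====
-- def get_section(input_string):
--     # One forward state-machine pass: resetting at every ', ' replaces the rfind
--     # slice, and words are accumulated character-by-character instead of
--     # filter-then-split.
--     words = []
--     cur = []
--     i = 0
--     n = len(input_string)
--     while i < n:
--         ch = input_string[i]
--         if ch == ',' and i + 1 < n and input_string[i + 1] == ' ':
--             # a later ', ' discards everything collected so far
--             words = []
--             cur = []
--             i += 2
--             continue
--         if ch.isalpha():
--             cur.append(ch)
--         elif ch == ' ':
--             if len(cur) > 1:
--                 words.append(''.join(cur))
--             cur = []
--         # any other character is dropped without ending the current word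
--         i += 1
--     if len(cur) > 1:
--         words.append(''.join(cur))
--     return ' '.join(words)
-- ===== Notes on version B (the rewrite author's own statement) =====
-- stated objective: alternative
-- what changed: B replaces A's three staged passes (rfind the last comma-space separator and slice, globally filter to letters+spaces, then split/filter/join) by a single forward state-machine pass over the string that accumulates cleaned words character-by-character and resets its accumulators whenever it crosses a comma-space separator occurrence.
import Mathlib
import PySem

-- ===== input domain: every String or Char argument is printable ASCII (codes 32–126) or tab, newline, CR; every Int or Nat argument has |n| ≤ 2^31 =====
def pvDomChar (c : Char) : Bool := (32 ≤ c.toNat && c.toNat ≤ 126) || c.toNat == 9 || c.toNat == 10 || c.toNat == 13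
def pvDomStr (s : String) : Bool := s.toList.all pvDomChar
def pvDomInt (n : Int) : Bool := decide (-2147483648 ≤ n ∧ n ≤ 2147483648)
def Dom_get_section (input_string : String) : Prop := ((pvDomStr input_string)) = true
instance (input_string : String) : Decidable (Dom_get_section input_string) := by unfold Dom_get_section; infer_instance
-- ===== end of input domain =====

-- B replaces A's three staged passes (rfind slice, character filter, split+filter+join)
-- by ONE forward state-machine pass that resets its accumulators at every ', '
-- (objective: alternative decomposition, same cost).

-- ===== PORT A =====
def get_section (input_string : String) : String :=
  let result₀ := input_string.toList
  let last_comma : Int := PySem.Chars.rfind input_string.toList [',', ' ']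
  let result₁ := if last_comma ≠ -1 then PySem.Chars.slice input_string.toList (some (last_comma + 2)) none else result₀
  -- keep only letters and spaces
  let result₂ := result₁.filter (fun c => PySem.Chars.isalpha c || c == ' ')
  -- remove single chars
  String.ofList (PySem.Chars.join [' '] ((PySem.Chars.split₀ result₂).filter (fun w => decide (w.length > 1))))

-- ===== PORT B =====
-- the while-loop of Source B: state (words, cur), index advance = structural recursion on the remaining list;
-- 'ch == "," and i+1 < n and input_string[i+1] == " "' is the head?-test, 'i += 2; continue' drops two chars
def get_section_alt_go (l : List Char) (words : List (List Char)) (cur : List Char) : List (List Char) :=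
  match l with
  | [] => if cur.length > 1 then words ++ [cur] else words
  | c :: rest =>
    if c = ',' ∧ rest.head? = some ' ' then
      get_section_alt_go rest.tail [] []
    else if PySem.Chars.isalpha c then
      get_section_alt_go rest words (cur ++ [c])
    else if c = ' ' then
      get_section_alt_go rest (if cur.length > 1 then words ++ [cur] else words) []
    else
      get_section_alt_go rest words cur
  termination_by l.length
  decreasing_by all_goals simp [List.length_tail] <;> omega

def get_section_alt (input_string : String) : String :=
  String.ofList (PySem.Chars.join [' '] (get_section_alt_go input_string.toList [] []))

-- ===== PRECONDITION & SPEC =====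
def Spec_get_section (input_string : String) (out : String) : Prop := out = get_section_alt input_string
instance (input_string : String) (out : String) : Decidable (Spec_get_section input_string out) := by unfold Spec_get_section; infer_instance

-- ===== CLAIM (what is proved, stated in full; the proofs are below) =====
def Claim_equal_get_section : Prop := ∀ (input_string : String), Dom_get_section input_string → Spec_get_section input_string (get_section input_string)

-- ===== LEMMAS AND PROOFS =====

-- 'l contains the two-character pattern ", "' (forward characterisation of rfind ≠ -1)
def pvHasCS (l : List Char) : Bool :=
  match l with
  | [] => false
  | c :: rest => if c = ',' ∧ rest.head? = some ' ' then true else pvHasCS rest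

-- the suffix after the LAST occurrence of ", " (forward characterisation of A's slice)
def pvSfx (l : List Char) : List Char :=
  match l with
  | [] => []
  | c :: rest =>
    if c = ',' ∧ rest.head? = some ' ' then
      (if pvHasCS rest.tail then pvSfx rest.tail else rest.tail)
    else pvSfx rest
  termination_by l.length
  decreasing_by all_goals simp [List.length_tail] <;> omega

lemma char_eq_of_toNat {a b : Char} (h : a.toNat = b.toNat) : a = b :=
  Char.ext (UInt32.toNat_inj.mp h)

-- on the ASCII(+tab/nl/cr) domain the only whitespace characters are ' ', '\t', '\n', '\r'
lemma dom_isspace {c : Char} (hd : pvDomChar c = true) (hs : PySem.Chars.isspace c = true) :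
    c = ' ' ∨ c = '\t' ∨ c = '\n' ∨ c = '\r' := by
  simp [pvDomChar] at hd
  simp [PySem.Chars.isspace] at hs
  have h32 : c.toNat = 32 ∨ c.toNat = 9 ∨ c.toNat = 10 ∨ c.toNat = 13 := by omega
  rcases h32 with h | h | h | h
  · exact Or.inl (char_eq_of_toNat h)
  · exact Or.inr (Or.inl (char_eq_of_toNat h))
  · exact Or.inr (Or.inr (Or.inl (char_eq_of_toNat h)))
  · exact Or.inr (Or.inr (Or.inr (char_eq_of_toNat h)))

-- for a domain character that is a letter or a space, "is whitespace" is exactly "is the space character"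
lemma isspace_eq_space {c : Char} (hd : pvDomChar c = true)
    (hp : (PySem.Chars.isalpha c || c == ' ') = true) :
    PySem.Chars.isspace c = (c == ' ') := by
  by_cases hc : c = ' '
  · subst hc; decide
  · have hb : (c == ' ') = false := by simp [hc]
    rw [hb]
    by_contra h
    have ht : PySem.Chars.isspace c = true := by
      revert h; cases (PySem.Chars.isspace c) <;> simp
    rcases dom_isspace hd ht with rfl | rfl | rfl | rfl
    · exact hc rfl
    · exact absurd hp (by decide)
    · exact absurd hp (by decide)
    · exact absurd hp (by decide)

-- PySem's whitespace split, on letters-and-spaces-only input, is splitOnP with empty pieces dropped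
lemma split0_go (l : List Char) : ∀ (cur : List Char) (acc : List (List Char)),
    (∀ c ∈ l, pvDomChar c = true ∧ (PySem.Chars.isalpha c || c == ' ') = true) →
    (∀ c ∈ cur, c ≠ ' ') →
    PySem.Chars.split₀.go l cur acc =
      acc.reverse ++ ((cur.reverse ++ l).splitOnP (· == ' ')).filter (fun w => !w.isEmpty) := by
  induction l with
  | nil =>
    intro cur acc _ hcur
    rw [PySem.Chars.split₀.go.eq_def]
    have hsingle : (cur.reverse).splitOnP (fun x => x == ' ') = [cur.reverse] := by
      apply List.splitOnP_eq_single
      intro b hb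
      simp [beq_iff_eq]
      exact hcur b (List.mem_reverse.mp hb)
    by_cases hc : cur = []
    · subst hc; simp
    · simp [hsingle, hc]
  | cons c rest ih =>
    intro cur acc hl hcur
    rw [PySem.Chars.split₀.go.eq_def]
    have hdc := (hl c (List.mem_cons_self ..))
    have hsp : PySem.Chars.isspace c = (c == ' ') := isspace_eq_space hdc.1 hdc.2
    have hrest : ∀ x ∈ rest, pvDomChar x = true ∧ (PySem.Chars.isalpha x || x == ' ') = true :=
      fun x hx => hl x (List.mem_cons_of_mem _ hx)
    by_cases hc : c = ' '
    · subst hc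
      have hfirst : (cur.reverse ++ ' ' :: rest).splitOnP (fun x => x == ' ') =
          cur.reverse :: rest.splitOnP (fun x => x == ' ') := by
        apply List.splitOnP_first
        · intro b hb; simp; exact hcur b (List.mem_reverse.mp hb)
        · simp
      rw [hfirst]
      simp only [hsp, beq_self_eq_true, if_true]
      by_cases he : cur = []
      · subst he
        simp only [List.isEmpty_nil, if_true]
        rw [ih [] acc hrest (by simp)]
        simp
      · have : cur.isEmpty = false := by simp [he]
        simp only [this, Bool.false_eq_true, if_false]
        rw [ih [] (cur.reverse :: acc) hrest (by simp)]
        simp [he]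
    · have : PySem.Chars.isspace c = false := by rw [hsp]; simp [hc]
      simp only [this, Bool.false_eq_true, if_false]
      rw [ih (c :: cur) acc hrest ?_]
      · simp
      · intro x hx
        rcases List.mem_cons.mp hx with rfl | hx
        · exact hc
        · exact hcur x hx

lemma split0_sp (l : List Char)
    (h : ∀ c ∈ l, pvDomChar c = true ∧ (PySem.Chars.isalpha c || c == ' ') = true) :
    PySem.Chars.split₀ l = (l.splitOnP (· == ' ')).filter (fun w => !w.isEmpty) := by
  unfold PySem.Chars.split₀
  rw [split0_go l [] [] h (by simp)]
  simp

-- filtering with a predicate that keeps the separator commutes with splitting on it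
lemma filter_splitOnP (q : Char → Bool) (hq : q ' ' = true) (r : List Char) :
    (r.filter q).splitOnP (· == ' ') = (r.splitOnP (· == ' ')).map (List.filter q) := by
  induction r with
  | nil => simp [List.splitOnP_nil]
  | cons c rest ih =>
    by_cases hc : c = ' '
    · subst hc
      simp only [List.filter_cons, hq, if_true, List.splitOnP_cons, beq_self_eq_true, ih]
      simp
    · have hcb : (c == ' ') = false := by simp [hc]
      rcases hsp : rest.splitOnP (fun x => x == ' ') with _ | ⟨hd, tl⟩
      · exact absurd hsp (List.splitOnP_ne_nil _ _)
      · rcases hqc : q c with _ | _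
        · simp only [List.filter_cons, hqc, Bool.false_eq_true, if_false, ih, hsp,
            List.splitOnP_cons, hcb, List.map_cons, List.modifyHead_cons]
        · simp only [List.filter_cons, hqc, if_true, List.splitOnP_cons, hcb,
            Bool.false_eq_true, if_false, ih, hsp, List.map_cons, List.modifyHead_cons]

-- pieces of a split on ' ' contain no ' '
lemma nospace_splitOnP (r : List Char) :
    ∀ w ∈ r.splitOnP (· == ' '), ∀ c ∈ w, c ≠ ' ' := by
  induction r with
  | nil => simp [List.splitOnP_nil]
  | cons c rest ih =>
    by_cases hc : c = ' '
    · subst hc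
      simp only [List.splitOnP_cons, beq_self_eq_true, if_true]
      intro w hw
      rcases List.mem_cons.mp hw with rfl | hw
      · simp
      · exact ih w hw
    · have hcb : (c == ' ') = false := by simp [hc]
      rcases hsp : rest.splitOnP (fun x => x == ' ') with _ | ⟨hd, tl⟩
      · exact absurd hsp (List.splitOnP_ne_nil _ _)
      · simp only [List.splitOnP_cons, hcb, Bool.false_eq_true, if_false, hsp,
          List.modifyHead_cons]
        intro w hw
        rcases List.mem_cons.mp hw with rfl | hw
        · intro x hx
          rcases List.mem_cons.mp hx with rfl | hx
          · exact hc
          · exact ih hd (by rw [hsp]; exact List.mem_cons_self ..) x hx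
        · exact ih w (by rw [hsp]; exact List.mem_cons_of_mem _ hw)

-- the two-character pattern as a prefix test
lemma pfxCS_iff (c : Char) (rest : List Char) :
    [',', ' '].isPrefixOf (c :: rest) = true ↔ (c = ',' ∧ rest.head? = some ' ') := by
  cases rest with
  | nil => simp [List.isPrefixOf]
  | cons d t =>
    simp only [List.isPrefixOf, List.head?_cons, Option.some.injEq, Bool.and_eq_true, beq_iff_eq]
    constructor
    · rintro ⟨h1, h2, -⟩; exact ⟨h1.symm, h2.symm⟩
    · rintro ⟨h1, h2⟩
      refine ⟨h1.symm, h2.symm, ?_⟩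
      simp [List.isPrefixOf]

-- rfind.go step equations (from its definition)
lemma rfind_go_succ (s sub : List Char) (j : Nat) :
    PySem.Chars.rfind.go s sub (j+1) =
      if sub.isPrefixOf (s.drop (j+1)) then ((j+1 : Nat) : Int) else PySem.Chars.rfind.go s sub j := by
  rw [PySem.Chars.rfind.go]

lemma rfind_go_zero (s sub : List Char) :
    PySem.Chars.rfind.go s sub 0 = if sub.isPrefixOf s then (0:Int) else -1 := by
  rw [PySem.Chars.rfind.go]

-- shifting rfind.go across a cons
lemma rfind_go_shift (c : Char) (rest sub : List Char) (j : Nat) :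
    PySem.Chars.rfind.go (c :: rest) sub (j+1) =
      if PySem.Chars.rfind.go rest sub j ≠ -1 then PySem.Chars.rfind.go rest sub j + 1
      else if sub.isPrefixOf (c :: rest) then 0 else -1 := by
  induction j with
  | zero =>
    rw [rfind_go_succ, rfind_go_zero, rfind_go_zero]
    have hdrop : (c :: rest).drop (0 + 1) = rest := rfl
    rw [hdrop]
    cases h : sub.isPrefixOf rest with
    | true => simp [h]
    | false => simp [h]
  | succ j ih =>
    rw [rfind_go_succ (c :: rest) sub (j+1), rfind_go_succ rest sub j]
    have hdrop : (c :: rest).drop (j + 1 + 1) = rest.drop (j + 1) := rfl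
    rw [hdrop]
    cases h : sub.isPrefixOf (rest.drop (j+1)) with
    | true =>
      have hne : ((j + 1 : Nat) : Int) ≠ -1 := by omega
      simp only [h, if_true, ne_eq, hne, not_false_iff]
      push_cast
      ring
    | false =>
      simp only [h, Bool.false_eq_true, if_false]
      exact ih

-- rfind head recursion
lemma rfind_cons (c : Char) (rest sub : List Char) :
    PySem.Chars.rfind (c :: rest) sub =
      if PySem.Chars.rfind rest sub ≠ -1 then PySem.Chars.rfind rest sub + 1
      else if sub.isPrefixOf (c :: rest) then 0 else -1 := by
  unfold PySem.Chars.rfind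
  have : (c :: rest).length = rest.length + 1 := rfl
  rw [this, rfind_go_shift]

lemma rfind_nil (sub : List Char) :
    PySem.Chars.rfind [] sub = if sub.isPrefixOf [] then (0:Int) else -1 := by
  unfold PySem.Chars.rfind
  exact rfind_go_zero [] sub

-- rfind's value, when found, is a natural number
lemma rfind_nonneg (l sub : List Char) (h : PySem.Chars.rfind l sub ≠ -1) :
    0 ≤ PySem.Chars.rfind l sub := by
  induction l with
  | nil =>
    rw [rfind_nil] at h ⊢
    cases hp : sub.isPrefixOf [] with
    | true => simp [hp]
    | false => rw [hp] at h; simp at h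
  | cons c rest ih =>
    rw [rfind_cons] at h ⊢
    by_cases hr : PySem.Chars.rfind rest sub ≠ -1
    · have := ih hr
      rw [if_pos hr]
      omega
    · rw [if_neg hr] at h ⊢
      cases hp : sub.isPrefixOf (c :: rest) with
      | true => simp
      | false => rw [hp] at h; simp at h

-- rfind = -1 exactly when the forward scan sees no ", "
lemma rfind_eq_neg_one_iff (l : List Char) :
    PySem.Chars.rfind l [',', ' '] = -1 ↔ pvHasCS l = false := by
  induction l with
  | nil => simp [rfind_nil, List.isPrefixOf, pvHasCS]
  | cons c rest ih =>
    rw [rfind_cons]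
    have hCS : pvHasCS (c :: rest) =
        (if c = ',' ∧ rest.head? = some ' ' then true else pvHasCS rest) := by
      rw [pvHasCS]
    by_cases hr : PySem.Chars.rfind rest [',', ' '] ≠ -1
    · have h0 := rfind_nonneg rest _ hr
      have hcs : pvHasCS rest = true := by
        rcases h : pvHasCS rest with _ | _
        · exact absurd (ih.mpr h) hr
        · rfl
      rw [if_pos hr]
      constructor
      · intro h; omega
      · intro h
        rw [hCS] at h
        split at h
        · exact absurd h (by simp)
        · rw [h] at hcs; exact absurd hcs (by simp)
    · have hm1 : PySem.Chars.rfind rest [',', ' '] = -1 := by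
        by_contra hx; exact hr hx
      have hcs : pvHasCS rest = false := ih.mp hm1
      rw [if_neg hr]
      cases hp : [',', ' '].isPrefixOf (c :: rest) with
      | true =>
        have hmm := (pfxCS_iff c rest).mp hp
        rw [hCS, if_pos hmm]
        simp
      | false =>
        have hnp : ¬ (c = ',' ∧ rest.head? = some ' ') := by
          intro hx
          rw [(pfxCS_iff c rest).mpr hx] at hp
          simp at hp
        rw [hCS, if_neg hnp]
        simp [hcs]

-- A's rfind-guarded slice equals the forward suffix-after-last-", " scan
lemma slice_eq_sfx (l : List Char) :
    (if PySem.Chars.rfind l [',', ' '] ≠ -1 then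
        PySem.List.slice l (some (PySem.Chars.rfind l [',', ' '] + 2)) none else l)
      = (if pvHasCS l then pvSfx l else l) := by
  induction l with
  | nil =>
    have : pvHasCS [] = false := rfl
    simp [rfind_nil, List.isPrefixOf, this]
  | cons c rest ih =>
    rw [rfind_cons]
    by_cases hr : PySem.Chars.rfind rest [',', ' '] ≠ -1
    · have h0 := rfind_nonneg rest _ hr
      obtain ⟨n, hn⟩ : ∃ n : Nat, PySem.Chars.rfind rest [',', ' '] = (n : Int) :=
        ⟨(PySem.Chars.rfind rest [',', ' ']).toNat, by omega⟩
      have hcs : pvHasCS rest = true := by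
        rcases h : pvHasCS rest with _ | _
        · exact absurd ((rfind_eq_neg_one_iff rest).mpr h) hr
        · rfl
      have hne : PySem.Chars.rfind rest [',', ' '] + 1 ≠ -1 := by omega
      rw [if_pos hr, if_pos hne]
      have hslice : PySem.List.slice (c :: rest) (some (PySem.Chars.rfind rest [',', ' '] + 1 + 2)) none
          = PySem.List.slice rest (some (PySem.Chars.rfind rest [',', ' '] + 2)) none := by
        rw [PySem.List.slice_from _ (by omega), PySem.List.slice_from _ (by omega), hn]
        have h1 : ((n : Int) + 1 + 2).toNat = ((n : Int) + 2).toNat + 1 := by omega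
        rw [h1]
        rfl
      rw [hslice]
      have hrs : PySem.List.slice rest (some (PySem.Chars.rfind rest [',', ' '] + 2)) none = pvSfx rest := by
        have := ih
        rw [if_pos hr] at this
        rw [hcs] at this
        simpa using this
      rw [hrs]
      have hcs' : pvHasCS (c :: rest) = true := by
        rw [pvHasCS]; split <;> simp [hcs]
      rw [if_pos hcs']
      rw [pvSfx]
      split
      · next hmatch =>
        -- c = ',' and rest = ' ' :: rest.tail; here pvHasCS rest.tail = pvHasCS rest = true
        obtain ⟨hc, hh⟩ := hmatch
        cases rest with
        | nil => simp at hh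
        | cons d t =>
          have hd : d = ' ' := by simpa using hh
          subst hd
          have ht : pvHasCS t = pvHasCS (' ' :: t) := by
            rw [pvHasCS]; simp
          have hcst : pvHasCS t = true := by rw [ht]; exact hcs
          have : (' ' :: t).tail = t := rfl
          rw [this, hcst]
          simp only [if_true]
          -- pvSfx (' ' :: t) = pvSfx t
          rw [pvSfx]
          simp
      · rfl
    · have hm1 : PySem.Chars.rfind rest [',', ' '] = -1 := by by_contra hx; exact hr hx
      have hcs : pvHasCS rest = false := (rfind_eq_neg_one_iff rest).mp hm1
      simp only [hr, if_false]
      by_cases hp : [',', ' '].isPrefixOf (c :: rest) = true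
      · obtain ⟨hc, hh⟩ := (pfxCS_iff c rest).mp hp
        cases rest with
        | nil => simp at hh
        | cons d t =>
          have hd : d = ' ' := by simpa using hh
          subst hd hc
          have hcst : pvHasCS t = false := by
            have : pvHasCS (' ' :: t) = pvHasCS t := by rw [pvHasCS]; simp
            rw [← this]; exact hcs
          have hcs' : pvHasCS (',' :: ' ' :: t) = true := by
            rw [pvHasCS]; simp
          rw [if_pos hp, if_pos (show ((0:Int)) ≠ -1 from by omega), hcs']
          rw [PySem.List.slice_from _ (by omega)]
          have h02 : ((0:Int) + 2).toNat = 2 := by decide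
          rw [h02, if_pos rfl, pvSfx]
          rw [if_pos (show (',' : Char) = ',' ∧ (' '::t).head? = some ' ' from ⟨rfl, rfl⟩)]
          rw [show (' '::t).tail = t from rfl, hcst]
          simp
      · have hnp : ¬ (c = ',' ∧ rest.head? = some ' ') := fun hx => hp ((pfxCS_iff c rest).mpr hx)
        have hcs' : pvHasCS (c :: rest) = false := by
          rw [pvHasCS]; simp [hnp, hcs]
        rw [if_neg hp, if_neg (show ¬((-1:Int) ≠ -1) from by omega), hcs']
        simp

-- B's scan after the last ", " : characterisation on pattern-free input
lemma goB_noCS (l : List Char) (words : List (List Char)) (cur : List Char)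
    (h : pvHasCS l = false) :
    get_section_alt_go l words cur =
      words ++ (((l.splitOnP (· == ' ')).map (List.filter PySem.Chars.isalpha)).modifyHead
        (fun t => cur ++ t)).filter (fun w => decide (w.length > 1)) := by
  induction l generalizing words cur with
  | nil =>
    rw [get_section_alt_go]
    simp only [List.splitOnP_nil, List.map_cons, List.map_nil, List.modifyHead_cons,
      List.append_nil]
    by_cases hc : cur.length > 1
    · rw [if_pos hc]; simp [List.filter_cons, hc]
    · rw [if_neg hc]; simp [List.filter_cons, hc]
  | cons c rest ih =>
    rw [pvHasCS] at h
    rw [get_section_alt_go]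
    split at h
    · exact absurd h (by simp)
    · next hnp =>
      rw [if_neg hnp]
      rcases hsp : rest.splitOnP (· == ' ') with _ | ⟨hd, tl⟩
      · exact absurd hsp (List.splitOnP_ne_nil _ _)
      · by_cases ha : PySem.Chars.isalpha c = true
        · have hcs : (c == ' ') = false := by
            have : c ≠ ' ' := by rintro rfl; exact absurd ha (by decide)
            simp [this]
          rw [if_pos ha, ih _ _ h]
          simp only [List.splitOnP_cons, hcs, Bool.false_eq_true, if_false, hsp,
            List.modifyHead_cons, List.map_cons, List.filter_cons, ha, if_true]
          simp
        · have ha' : PySem.Chars.isalpha c = false := by simpa using ha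
          rw [if_neg (by simp [ha'])]
          by_cases hc : c = ' '
          · subst hc
            rw [if_pos rfl, ih _ _ h]
            simp only [List.splitOnP_cons, beq_self_eq_true, if_true, hsp,
              List.map_cons, List.modifyHead_cons, List.filter_cons]
            split <;> simp_all
          · rw [if_neg hc, ih _ _ h]
            have hcs : (c == ' ') = false := by simp [hc]
            simp only [List.splitOnP_cons, hcs, Bool.false_eq_true, if_false, hsp,
              List.modifyHead_cons, List.map_cons, List.filter_cons, ha', if_false]

lemma modifyHead_fun_id (X : List (List Char)) : X.modifyHead (fun t => t) = X := by
  cases X <;> rfl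

-- B's scan jumps to the suffix after the last ", "
lemma goB_CS (l : List Char) : pvHasCS l = true →
    ∀ (words : List (List Char)) (cur : List Char),
      get_section_alt_go l words cur = get_section_alt_go (pvSfx l) [] [] := by
  induction l using pvSfx.induct with
  | case1 => intro h _ _; simp [pvHasCS] at h
  | case2 c rest hmatch hcs ih =>
    intro h words cur
    rw [get_section_alt_go, if_pos hmatch, pvSfx, if_pos hmatch, if_pos hcs]
    exact ih hcs [] []
  | case3 c rest hmatch hncs =>
    intro h words cur
    rw [get_section_alt_go, if_pos hmatch, pvSfx, if_pos hmatch, if_neg hncs]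
  | case4 c rest hnp ih =>
    intro h words cur
    have hrest : pvHasCS rest = true := by
      rw [pvHasCS] at h; rwa [if_neg hnp] at h
    rw [get_section_alt_go, if_neg hnp, pvSfx, if_neg hnp]
    by_cases ha : PySem.Chars.isalpha c = true
    · rw [if_pos ha]; exact ih hrest _ _
    · rw [if_neg ha]
      by_cases hc : c = ' '
      · rw [if_pos hc]; exact ih hrest _ _
      · rw [if_neg hc]; exact ih hrest _ _

-- the suffix after the last ", " contains no further ", "
lemma hasCS_sfx (l : List Char) (h : pvHasCS l = true) : pvHasCS (pvSfx l) = false := by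
  induction l using pvSfx.induct with
  | case1 => simp [pvHasCS] at h
  | case2 c rest hmatch hcs ih =>
    rw [pvSfx, if_pos hmatch, if_pos hcs]
    exact ih hcs
  | case3 c rest hmatch hncs =>
    rw [pvSfx, if_pos hmatch, if_neg hncs]
    simpa using hncs
  | case4 c rest hnp ih =>
    have hrest : pvHasCS rest = true := by
      rw [pvHasCS] at h; rwa [if_neg hnp] at h
    rw [pvSfx, if_neg hnp]
    exact ih hrest

-- ===== VERDICT (by name: the statement is the Claim_ definition above) =====
theorem get_section_spec : Claim_equal_get_section := by
  intro s hdom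
  unfold Spec_get_section get_section get_section_alt
  simp only []
  have hdomall : ∀ c ∈ s.toList, pvDomChar c = true := by
    simpa [Dom_get_section, pvDomStr, List.all_eq_true] using hdom
  set lc := PySem.Chars.rfind s.toList [',', ' '] with hlc
  set rs := if lc ≠ -1 then PySem.Chars.slice s.toList (some (lc + 2)) none else s.toList with hrs
  -- A's sliced suffix is the forward-scan suffix
  have hrs' : rs = if pvHasCS s.toList then pvSfx s.toList else s.toList := by
    rw [hrs, hlc]
    simpa [PySem.Chars.slice_eq_listSlice] using slice_eq_sfx s.toList
  have hdomr : ∀ c ∈ rs, pvDomChar c = true := by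
    intro c hc
    apply hdomall
    rw [hrs] at hc
    by_cases h : lc ≠ -1
    · rw [if_pos h, PySem.Chars.slice_eq_listSlice] at hc
      exact PySem.List.mem_of_mem_slice _ _ _ hc
    · rwa [if_neg h] at hc
  congr 1
  congr 1
  -- A side: split₀ of the filtered string, normalised to splitOnP + per-token filtering
  have hgood : ∀ c ∈ rs.filter (fun c => PySem.Chars.isalpha c || c == ' '),
      pvDomChar c = true ∧ (PySem.Chars.isalpha c || c == ' ') = true := by
    intro c hc
    exact ⟨hdomr c (List.mem_filter.mp hc).1, (List.mem_filter.mp hc).2⟩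
  rw [split0_sp _ hgood, filter_splitOnP _ (by decide), List.filter_filter]
  have hmapeq : (List.splitOnP (fun x => x == ' ') rs).map (List.filter fun c => PySem.Chars.isalpha c || c == ' ')
      = (List.splitOnP (fun x => x == ' ') rs).map (List.filter PySem.Chars.isalpha) := by
    apply List.map_congr_left
    intro w hw
    apply List.filter_congr
    intro c hcw
    have hne := nospace_splitOnP rs w hw c hcw
    simp [hne]
  rw [hmapeq]
  have hpred : ∀ (a : List Char), (decide (a.length > 1) && !a.isEmpty) = decide (a.length > 1) := by
    intro a; cases a <;> simp
  simp only [hpred]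
  -- B side
  by_cases hcs : pvHasCS s.toList = true
  · rw [goB_CS _ hcs, goB_noCS _ _ _ (hasCS_sfx _ hcs)]
    rw [hrs', if_pos hcs]
    simp [modifyHead_fun_id]
  · have hcs' : pvHasCS s.toList = false := by simpa using hcs
    rw [goB_noCS _ _ _ hcs']
    rw [hrs', hcs']
    simp [modifyHead_fun_id]
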